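-- pv_equiv track=rewrite | github.com/AlenaMus/L-25-TheAgentsGame | agents/league_manager/src/league_manager/scheduler/round_robin.py | create_round_robin_schedule
-- ===== SOURCE A (Python) =====
-- from itertools import combinations
-- from typing import List, Tuple
--
-- def create_round_robin_schedule(player_ids: List[str]) -> List[List[Tuple[str, str]]]:
--     """
--     Create round-robin schedule for all players.
--
--     Each player plays every other player exactly once.
--     Matches distributed across rounds (no player plays twice in same round).
--
--     Args:
--         player_ids: List of player IDs
--
--     Returns:
--         List of rounds, each round is list of matches (tuples)
--
--     Example:
--         >>> schedule = create_round_robin_schedule(["P01", "P02", "P03", "P04"])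
--         >>> len(schedule)  # 3 rounds for 4 players
--         3
--         >>> len(schedule[0])  # 2 matches in round 1
--         2
--     """
--     n = len(player_ids)
--     if n < 2:
--         return []
--
--     # Generate all possible pairings
--     all_matches = list(combinations(player_ids, 2))
--
--     # Calculate number of rounds
--     num_rounds = n - 1 if n % 2 == 0 else n
--
--     # Initialize rounds
--     rounds = [[] for _ in range(num_rounds)]
--
--     # Assign matches to rounds
--     for match in all_matches:
--         # Find first round where neither player is already playing
--         for round_idx in range(num_rounds):
--             players_in_round = set()
--             for m in rounds[round_idx]:
--                 players_in_round.add(m[0])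
--                 players_in_round.add(m[1])
--
--             # Check if both players are free
--             if match[0] not in players_in_round and match[1] not in players_in_round:
--                 rounds[round_idx].append(match)
--                 break
--
--     return rounds
-- ===== SOURCE B (Python) =====
-- from itertools import combinations
--
-- def create_round_robin_schedule(player_ids):
--     n = len(player_ids)
--     if n < 2:
--         return []
--     num_rounds = n - 1 if n % 2 == 0 else n
--     remaining = list(combinations(player_ids, 2))
--     rounds = []
--     for _ in range(num_rounds):
--         busy = set()
--         this_round = []
--         rest = []
--         for u, v in remaining:
--             if u in busy or v in busy:
--                 rest.append((u, v))
--             else: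
--                 this_round.append((u, v))
--                 busy.add(u)
--                 busy.add(v)
--         rounds.append(this_round)
--         remaining = rest
--     return rounds
-- ===== Notes on version B (the rewrite author's own statement) =====
-- stated objective: faster
-- what changed: B builds the schedule round by round (round-major): for each round it makes one pass over the still-unscheduled matches with an incrementally maintained busy-set, splitting them into this round and a remainder, instead of A's match-major loop that rescans every round and rebuilds each round's player set per match; proved to yield the identical schedule.
import Mathlib
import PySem

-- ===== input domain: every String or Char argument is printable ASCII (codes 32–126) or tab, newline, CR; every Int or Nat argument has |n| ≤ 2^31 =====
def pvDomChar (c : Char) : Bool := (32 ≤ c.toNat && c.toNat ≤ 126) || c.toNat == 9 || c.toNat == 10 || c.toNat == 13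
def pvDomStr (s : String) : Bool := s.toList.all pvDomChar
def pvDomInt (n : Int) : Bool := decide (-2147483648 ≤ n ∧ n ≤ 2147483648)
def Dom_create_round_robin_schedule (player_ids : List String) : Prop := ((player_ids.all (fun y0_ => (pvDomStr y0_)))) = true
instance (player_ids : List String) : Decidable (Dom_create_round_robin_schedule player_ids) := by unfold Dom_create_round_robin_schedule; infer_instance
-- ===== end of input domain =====

-- B schedules round-major (one pass over the remaining matches per round, with an
-- incrementally maintained busy-set) instead of A's match-major first-fit scan that
-- rebuilds each candidate round's player set per match; same schedule, fewer passes.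

-- ===== PORT A =====
-- itertools.combinations(xs, 2), in Python's order
def pvCombos2 {α : Type} : List α → List (α × α)
  | [] => []
  | x :: xs => xs.map (fun y => (x, y)) ++ pvCombos2 xs

-- the per-round player set A rebuilds: for m in rounds[round_idx]: add m[0]; add m[1]
def pvOcc (r : List (String × String)) : PySem.Set String :=
  r.foldl (fun s p => PySem.Set.add (PySem.Set.add s p.1) p.2) PySem.Set.empty

-- inner 'for round_idx in range(num_rounds)' loop: recursion over the rounds list
-- = scan of round indices 0.. in order, with 'break' after the first placement
def pvAssignA (m : String × String) : List (List (String × String)) → List (List (String × String))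
  | [] => []
  | r :: rest =>
      if ¬ PySem.Set.contains (pvOcc r) m.1 ∧ ¬ PySem.Set.contains (pvOcc r) m.2 then
        (r ++ [m]) :: rest
      else
        r :: pvAssignA m rest

def create_round_robin_schedule (player_ids : List String) : List (List (String × String)) :=
  let n := player_ids.length
  if n < 2 then []
  else
    let all_matches := pvCombos2 player_ids
    let num_rounds := if n % 2 == 0 then n - 1 else n
    let rounds : List (List (String × String)) := List.replicate num_rounds []
    all_matches.foldl (fun rs m => pvAssignA m rs) rounds

-- ===== PORT B =====
-- B's inner 'for u, v in remaining' pass: split the remaining matches into this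
-- round and the rest, growing the busy-set as matches are placed
def pvPass (busy : PySem.Set String) :
    List (String × String) → List (String × String) × List (String × String)
  | [] => ([], [])
  | (u, v) :: ms =>
      if PySem.Set.contains busy u || PySem.Set.contains busy v then
        let pq := pvPass busy ms
        (pq.1, (u, v) :: pq.2)
      else
        let pq := pvPass (PySem.Set.add (PySem.Set.add busy u) v) ms
        ((u, v) :: pq.1, pq.2)

-- B's outer 'for _ in range(num_rounds)' loop over the shrinking remainder
def pvRoundsB : Nat → List (String × String) → List (List (String × String))
  | 0, _ => []
  | k + 1, remaining =>
      let pr := pvPass PySem.Set.empty remaining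
      pr.1 :: pvRoundsB k pr.2

def create_round_robin_schedule_alt (player_ids : List String) : List (List (String × String)) :=
  let n := player_ids.length
  if n < 2 then []
  else
    let num_rounds := if n % 2 == 0 then n - 1 else n
    pvRoundsB num_rounds (pvCombos2 player_ids)

-- ===== PRECONDITION & SPEC =====
def Spec_create_round_robin_schedule (player_ids : List String) (out : List (List (String × String))) : Prop := out = create_round_robin_schedule_alt player_ids
instance (player_ids : List String) (out : List (List (String × String))) : Decidable (Spec_create_round_robin_schedule player_ids out) := by unfold Spec_create_round_robin_schedule; infer_instance

-- ===== CLAIM (what is proved, stated in full; the proofs are below) =====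
def Claim_equal_create_round_robin_schedule : Prop := ∀ (player_ids : List String), Dom_create_round_robin_schedule player_ids → Spec_create_round_robin_schedule player_ids (create_round_robin_schedule player_ids)

-- ===== LEMMAS AND PROOFS =====

lemma pvOcc_append (r : List (String × String)) (m : String × String) :
    pvOcc (r ++ [m]) = PySem.Set.add (PySem.Set.add (pvOcc r) m.1) m.2 := by
  simp [pvOcc, List.foldl_append]

lemma pvFoldl_assign_nil (ms : List (String × String)) :
    ms.foldl (fun rs m => pvAssignA m rs) [] = [] := by
  induction ms with
  | nil => rfl
  | cons m ms ih => simpa [pvAssignA] using ih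

-- the heart: A's match-major fold on a rounds list r :: rs distributes — the head
-- round ends up with exactly the matches B's single pass accepts, and the deeper
-- rounds see exactly the matches that pass rejects, in order
lemma pvFold_cons (ms : List (String × String)) :
    ∀ (r : List (String × String)) (rs : List (List (String × String))),
    ms.foldl (fun st m => pvAssignA m st) (r :: rs)
      = (r ++ (pvPass (pvOcc r) ms).1)
        :: ((pvPass (pvOcc r) ms).2.foldl (fun st m => pvAssignA m st) rs) := by
  induction ms with
  | nil => intro r rs; simp [pvPass]
  | cons m ms ih =>
      intro r rs
      obtain ⟨u, v⟩ := m
      rw [List.foldl_cons]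
      by_cases hb : (PySem.Set.contains (pvOcc r) u || PySem.Set.contains (pvOcc r) v) = true
      · -- blocked: A skips the head round, B's pass sends (u, v) to the remainder
        have hA : pvAssignA (u, v) (r :: rs) = r :: pvAssignA (u, v) rs := by
          rw [pvAssignA]
          rw [if_neg]
          intro hc
          rcases Bool.or_eq_true_iff.mp hb with h | h
          · exact hc.1 h
          · exact hc.2 h
        rw [hA, ih r (pvAssignA (u, v) rs)]
        rw [pvPass, if_pos hb]
        rw [List.foldl_cons]
      · -- free: A places (u, v) in the head round, B's pass accepts it
        have hb1 : PySem.Set.contains (pvOcc r) u = false := by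
          rcases Bool.or_eq_false_iff.mp (Bool.eq_false_iff.mpr hb) with ⟨h1, h2⟩
          exact h1
        have hb2 : PySem.Set.contains (pvOcc r) v = false := by
          rcases Bool.or_eq_false_iff.mp (Bool.eq_false_iff.mpr hb) with ⟨h1, h2⟩
          exact h2
        have hA : pvAssignA (u, v) (r :: rs) = (r ++ [(u, v)]) :: rs := by
          rw [pvAssignA, if_pos]
          constructor
          · intro hc; rw [hb1] at hc; exact absurd hc (by simp)
          · intro hc; rw [hb2] at hc; exact absurd hc (by simp)
        rw [hA, ih (r ++ [(u, v)]) rs]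
        rw [pvPass, if_neg hb]
        rw [pvOcc_append]
        simp [List.append_assoc]

lemma pvFold_eq_rounds (k : Nat) :
    ∀ ms : List (String × String),
    ms.foldl (fun rs m => pvAssignA m rs) (List.replicate k []) = pvRoundsB k ms := by
  induction k with
  | zero => intro ms; simpa using pvFoldl_assign_nil ms
  | succ k ih =>
      intro ms
      rw [List.replicate_succ, pvFold_cons ms [] (List.replicate k [])]
      show ([] ++ (pvPass (pvOcc []) ms).1) :: _ = _
      rw [pvRoundsB]
      have hocc : pvOcc [] = PySem.Set.empty := rfl
      rw [hocc, List.nil_append, ih (pvPass PySem.Set.empty ms).2]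

-- ===== VERDICT (by name: the statement is the Claim_ definition above) =====
theorem create_round_robin_schedule_spec : Claim_equal_create_round_robin_schedule := by
  intro ids _
  unfold Spec_create_round_robin_schedule
  unfold create_round_robin_schedule create_round_robin_schedule_alt
  simp only []
  by_cases h2 : ids.length < 2
  · rw [if_pos h2, if_pos h2]
  · rw [if_neg h2, if_neg h2]
    exact pvFold_eq_rounds _ (pvCombos2 ids)
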